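-- pv_equiv track=rewrite | github.com/trytodupe/ttd-bot | src/plugins/tetr_chercher/__init__.py | _command_case_aliases
-- ===== SOURCE A (Python) =====
-- from itertools import product
--
-- def _case_variants(text: str) -> set[str]:
--     variants: list[tuple[str, ...]] = []
--     for char in text:
--         lowered = char.lower()
--         uppered = char.upper()
--         if lowered == uppered:
--             variants.append((char,))
--         else:
--             variants.append((lowered, uppered))
--     return {"".join(chars) for chars in product(*variants)}
--
-- def _command_case_aliases(*commands: tuple[str, ...]) -> set[tuple[str, ...]]:
--     aliases: set[tuple[str, ...]] = set()
--     for command in commands: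
--         variants: list[set[str]] = []
--         for part in command:
--             variants.append(_case_variants(part))
--         aliases.update(product(*variants))
--     return aliases
-- ===== SOURCE B (Python) =====
-- def _expand(options):
--     # enumerate the cartesian product by integer index instead of itertools.product
--     total = 1
--     for opt in options:
--         total *= len(opt)
--     out = []
--     for i in range(total):
--         parts = []
--         x, rem = i, total
--         for opt in options:
--             rem //= len(opt)
--             parts.append(opt[x // rem])
--             x %= rem
--         out.append(parts)
--     return out
--
--
-- def _case_variants(text: str) -> set[str]:
--     choices = []
--     for ch in text:
--         lo = ch.lower()
--         up = ch.upper()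
--         choices.append((ch,) if lo == up else (lo, up))
--     return {"".join(parts) for parts in _expand(choices)}
--
--
-- def _command_case_aliases(*commands: tuple[str, ...]) -> set[tuple[str, ...]]:
--     aliases: set[tuple[str, ...]] = set()
--     for command in commands:
--         variants = [list(_case_variants(part)) for part in command]
--         for parts in _expand(variants):
--             aliases.add(tuple(parts))
--     return aliases
-- ===== Notes on version B (the rewrite author's own statement) =====
-- stated objective: alternative
-- what changed: Both cartesian products (per-character case options and per-part variant lists) are enumerated by a single integer index over range(total) decoded with suffix-product floor-division/modulo instead of itertools.product over option tuples.
import Mathlib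
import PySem

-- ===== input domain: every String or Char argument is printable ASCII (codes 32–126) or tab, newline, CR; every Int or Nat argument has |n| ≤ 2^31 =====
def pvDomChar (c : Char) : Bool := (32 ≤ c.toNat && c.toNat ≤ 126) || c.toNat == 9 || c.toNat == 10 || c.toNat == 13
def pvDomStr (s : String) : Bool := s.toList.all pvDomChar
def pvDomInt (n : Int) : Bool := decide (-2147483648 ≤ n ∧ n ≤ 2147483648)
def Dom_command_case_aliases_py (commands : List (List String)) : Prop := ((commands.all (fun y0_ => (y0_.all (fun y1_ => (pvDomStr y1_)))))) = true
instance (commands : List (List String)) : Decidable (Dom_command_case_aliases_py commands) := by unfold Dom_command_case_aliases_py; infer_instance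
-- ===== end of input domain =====

-- B replaces itertools.product over option tuples by an integer-index loop decoded with
-- suffix-product division/modulo (objective: alternative decomposition, same cost).

-- ===== PORT A =====
-- NOTE: _command_case_aliases(*commands) is called with ONE positional argument, so the
-- vararg tuple is (commands,): the outer 'for command in commands' loop runs once with
-- command = the input; each part is a tuple of strings iterated element-wise by _case_variants.
-- itertools.product(*opts) over lists, in itertools' order (rightmost varies fastest)
def pvProduct (opts : List (List String)) : List (List String) :=
  opts.foldr (fun o acc => o.flatMap (fun x => acc.map (fun l => x :: l))) [[]]

-- _case_variants: per-element option tuples, product, join, set comprehension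
def pvCaseVariantsA (text : List String) : PySem.Set String :=
  let variants : List (List String) := text.foldl (fun acc ch =>
    let lowered := PySem.Str.lower ch
    let uppered := PySem.Str.upper ch
    if lowered == uppered then acc ++ [[ch]]
    else acc ++ [[lowered, uppered]]) []
  PySem.Set.ofList ((pvProduct variants).map (fun chars => PySem.Str.join "" chars))

def command_case_aliases_py (commands : List (List String)) : List (List String) :=
  [commands].foldl (fun aliases command =>
    let variants : List (PySem.Set String) :=
      command.foldl (fun vs part => vs ++ [pvCaseVariantsA part]) []
    PySem.Set.update aliases (pvProduct variants)) PySem.Set.empty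

-- ===== PORT B =====
-- inner loop of _expand over the options, carrying (parts, x, rem);
-- all integers are nonnegative here, so Nat '/' and '%' are exactly Python's '//' and '%'
def pvDecode (options : List (List String)) (parts : List String) (x rem : Nat) : List String :=
  match options with
  | [] => parts
  | opt :: rest =>
      let rem2 := rem / opt.length
      pvDecode rest (parts ++ [opt.getD (x / rem2) ""]) (x % rem2) rem2

-- _expand: enumerate the product by integer index
def pvExpand (options : List (List String)) : List (List String) :=
  let total := options.foldl (fun t opt => t * opt.length) 1
  (List.range total).map (fun i => pvDecode options [] i total)

-- B's _case_variants: same per-element choices, expanded by index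
def pvCaseVariantsB (text : List String) : PySem.Set String :=
  let choices : List (List String) := text.foldl (fun acc ch =>
    let lo := PySem.Str.lower ch
    let up := PySem.Str.upper ch
    if lo == up then acc ++ [[ch]]
    else acc ++ [[lo, up]]) []
  PySem.Set.ofList ((pvExpand choices).map (fun parts => PySem.Str.join "" parts))

def command_case_aliases_py_alt (commands : List (List String)) : List (List String) :=
  [commands].foldl (fun aliases command =>
    let variants : List (List String) := command.map (fun part => pvCaseVariantsB part)
    (pvExpand variants).foldl (fun al parts => PySem.Set.add al parts) aliases) PySem.Set.empty

-- ===== PRECONDITION & SPEC =====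
def Spec_command_case_aliases_py (commands : List (List String)) (out : List (List String)) : Prop := out = command_case_aliases_py_alt commands
instance (commands : List (List String)) (out : List (List String)) : Decidable (Spec_command_case_aliases_py commands out) := by unfold Spec_command_case_aliases_py; infer_instance

-- ===== CLAIM (what is proved, stated in full; the proofs are below) =====
def Claim_equal_command_case_aliases_py : Prop := ∀ (commands : List (List String)), Dom_command_case_aliases_py commands → Spec_command_case_aliases_py commands (command_case_aliases_py commands)

-- ===== LEMMAS AND PROOFS =====

theorem pvDecode_acc (options : List (List String)) (parts : List String) (x rem : Nat) :
    pvDecode options parts x rem = parts ++ pvDecode options [] x rem := by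
  induction options generalizing parts x rem with
  | nil => simp [pvDecode]
  | cons o rest ih =>
      simp only [pvDecode]
      conv_lhs => rw [ih]
      conv_rhs => rw [ih]
      simp

-- one block of the index enumeration: splitting range (o.length * m) into o.length blocks of m
theorem pvBlockify (m : Nat) (hm : 0 < m) (g : Nat → List String) (o : List String) :
    (List.range (o.length * m)).map (fun i => o.getD (i / m) "" :: g (i % m))
      = o.flatMap (fun x => (List.range m).map (fun i => x :: g i)) := by
  induction o with
  | nil => simp
  | cons x o' ih =>
      have hsplit : (x :: o').length * m = m + o'.length * m := by
        simp [List.length_cons, Nat.succ_mul, Nat.add_comm]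
      rw [hsplit, List.range_add, List.map_append, List.map_map]
      have h1 : (List.range m).map (fun i => (x :: o').getD (i / m) "" :: g (i % m))
          = (List.range m).map (fun i => x :: g i) := by
        apply List.map_congr_left
        intro i hi
        have hi' : i < m := List.mem_range.mp hi
        rw [Nat.div_eq_of_lt hi', Nat.mod_eq_of_lt hi']
        rfl
      have h2 : ((List.range (o'.length * m)).map
            ((fun i => (x :: o').getD (i / m) "" :: g (i % m)) ∘ (fun j => m + j)))
          = (List.range (o'.length * m)).map (fun j => o'.getD (j / m) "" :: g (j % m)) := by
        apply List.map_congr_left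
        intro j _
        simp only [Function.comp]
        rw [Nat.add_comm m j, Nat.add_div_right j hm, Nat.add_mod_right j m]
        rfl
      rw [h1, h2, ih]
      simp [List.flatMap_cons]

theorem pvTotal_eq (options : List (List String)) (a : Nat) :
    options.foldl (fun t opt => t * opt.length) a = a * (options.map List.length).prod := by
  induction options generalizing a with
  | nil => simp
  | cons o rest ih => simp [List.foldl_cons, ih, Nat.mul_assoc]

theorem pvProd_pos (options : List (List String)) (h : ∀ o ∈ options, o ≠ []) :
    0 < (options.map List.length).prod := by
  induction options with
  | nil => simp
  | cons o rest ih =>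
      simp only [List.map_cons, List.prod_cons]
      have ho : o ≠ [] := h o (by simp)
      have : 0 < o.length := List.length_pos_iff.mpr ho
      exact Nat.mul_pos this (ih (fun x hx => h x (by simp [hx])))

theorem pvDecodeMap_eq (options : List (List String)) (h : ∀ o ∈ options, o ≠ []) :
    (List.range ((options.map List.length).prod)).map
        (fun i => pvDecode options [] i ((options.map List.length).prod))
      = pvProduct options := by
  induction options with
  | nil => simp [pvDecode, pvProduct]
  | cons o rest ih =>
      have ho : o ≠ [] := h o (by simp)
      have hrest : ∀ x ∈ rest, x ≠ [] := fun x hx => h x (by simp [hx])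
      have hm : 0 < (rest.map List.length).prod := pvProd_pos rest hrest
      simp only [List.map_cons, List.prod_cons]
      have hstep : ∀ i : Nat,
          pvDecode (o :: rest) [] i (o.length * (rest.map List.length).prod)
            = o.getD (i / (rest.map List.length).prod) ""
                :: pvDecode rest [] (i % (rest.map List.length).prod) ((rest.map List.length).prod) := by
        intro i
        simp only [pvDecode]
        have hdiv : o.length * (rest.map List.length).prod / o.length = (rest.map List.length).prod := by
          rw [Nat.mul_div_cancel_left _ (List.length_pos_iff.mpr ho)]
        rw [hdiv, pvDecode_acc]
        simp
      rw [List.map_congr_left (fun i _ => hstep i),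
        pvBlockify ((rest.map List.length).prod) hm
          (fun j => pvDecode rest [] j ((rest.map List.length).prod)) o]
      have hx : (fun x => (List.range ((rest.map List.length).prod)).map
            (fun i => x :: pvDecode rest [] i ((rest.map List.length).prod)))
          = (fun x => (pvProduct rest).map (fun l => x :: l)) := by
        funext x
        rw [← ih hrest, List.map_map]
        rfl
      rw [hx]
      rfl

-- main lemma: the index enumeration equals itertools.product
theorem pvExpand_eq_product (options : List (List String)) (h : ∀ o ∈ options, o ≠ []) :
    pvExpand options = pvProduct options := by
  show (List.range (options.foldl (fun t opt => t * opt.length) 1)).map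
      (fun i => pvDecode options [] i (options.foldl (fun t opt => t * opt.length) 1))
    = pvProduct options
  rw [pvTotal_eq, Nat.one_mul]
  exact pvDecodeMap_eq options h

theorem pvProduct_ne_nil (options : List (List String)) (h : ∀ o ∈ options, o ≠ []) :
    pvProduct options ≠ [] := by
  induction options with
  | nil => simp [pvProduct]
  | cons o rest ih =>
      have ho : o ≠ [] := h o (by simp)
      have hrest := ih (fun x hx => h x (by simp [hx]))
      simp only [pvProduct, List.foldr_cons] at *
      intro hnil
      rw [List.flatMap_eq_nil_iff] at hnil
      obtain ⟨x, hx⟩ := List.exists_mem_of_ne_nil o ho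
      have := hnil x hx
      simp [List.map_eq_nil_iff] at this
      exact hrest this

-- the per-element choices list computed by both _case_variants (identical in A and B)
def pvChoices (text : List String) : List (List String) :=
  text.foldl (fun acc ch =>
    let lo := PySem.Str.lower ch
    let up := PySem.Str.upper ch
    if lo == up then acc ++ [[ch]]
    else acc ++ [[lo, up]]) []

theorem pvChoices_ne_nil (text : List String) : ∀ o ∈ pvChoices text, o ≠ [] := by
  unfold pvChoices
  have key : ∀ (l : List String) (acc : List (List String)), (∀ o ∈ acc, o ≠ []) →
      ∀ o ∈ l.foldl (fun acc ch =>
        let lo := PySem.Str.lower ch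
        let up := PySem.Str.upper ch
        if lo == up then acc ++ [[ch]]
        else acc ++ [[lo, up]]) acc, o ≠ [] := by
    intro l
    induction l with
    | nil => intro acc hacc; exact hacc
    | cons c cs ih =>
        intro acc hacc
        simp only [List.foldl_cons]
        apply ih
        intro o ho
        by_cases hc : (PySem.Str.lower c == PySem.Str.upper c) = true
        · simp [hc] at ho
          rcases ho with ho | ho
          · exact hacc o ho
          · simp [ho]
        · simp [hc] at ho
          rcases ho with ho | ho
          · exact hacc o ho
          · simp [ho]
  exact key text [] (by simp)

theorem pvCaseVariantsA_def (text : List String) :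
    pvCaseVariantsA text
      = PySem.Set.ofList ((pvProduct (pvChoices text)).map (fun chars => PySem.Str.join "" chars)) := rfl

theorem pvCaseVariantsB_def (text : List String) :
    pvCaseVariantsB text
      = PySem.Set.ofList ((pvExpand (pvChoices text)).map (fun parts => PySem.Str.join "" parts)) := rfl

theorem pvCaseVariants_eq (text : List String) : pvCaseVariantsA text = pvCaseVariantsB text := by
  rw [pvCaseVariantsA_def, pvCaseVariantsB_def, pvExpand_eq_product _ (pvChoices_ne_nil text)]

theorem pvCaseVariantsA_ne_nil (text : List String) : (pvCaseVariantsA text : List String) ≠ [] := by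
  rw [pvCaseVariantsA_def]
  intro hnil
  have hprod := pvProduct_ne_nil _ (pvChoices_ne_nil text)
  obtain ⟨l, hl⟩ := List.exists_mem_of_ne_nil _ hprod
  have hmem : PySem.Str.join "" l ∈
      (pvProduct (pvChoices text)).map (fun chars => PySem.Str.join "" chars) :=
    List.mem_map_of_mem hl
  have hmem2 : PySem.Str.join "" l ∈ PySem.Set.ofList
      ((pvProduct (pvChoices text)).map (fun chars => PySem.Str.join "" chars)) :=
    (PySem.Set.mem_ofList _ _).mpr hmem
  rw [hnil] at hmem2
  simp at hmem2

theorem pvVariants_eq (command : List (List String)) :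
    command.foldl (fun vs part => vs ++ [pvCaseVariantsA part]) []
      = command.map (fun part => (pvCaseVariantsB part : List String)) := by
  rw [PySem.List.foldl_append_singleton_eq_map]
  simp only [List.nil_append]
  exact List.map_congr_left (fun p _ => pvCaseVariants_eq p)

-- ===== VERDICT (by name: the statement is the Claim_ definition above) =====
theorem command_case_aliases_py_spec : Claim_equal_command_case_aliases_py := by
  intro commands _
  unfold Spec_command_case_aliases_py command_case_aliases_py command_case_aliases_py_alt
  apply PySem.List.foldl_congr_mem
  intro al cmd _
  show PySem.Set.update al (pvProduct (cmd.foldl (fun vs part => vs ++ [pvCaseVariantsA part]) []))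
    = (pvExpand (cmd.map (fun part => (pvCaseVariantsB part : List String)))).foldl
        (fun al parts => PySem.Set.add al parts) al
  rw [pvVariants_eq cmd]
  have hne : ∀ o ∈ cmd.map (fun part => (pvCaseVariantsB part : List String)), o ≠ [] := by
    intro o ho
    obtain ⟨p, _, hp⟩ := List.mem_map.mp ho
    rw [← hp, ← pvCaseVariants_eq]
    exact pvCaseVariantsA_ne_nil p
  rw [pvExpand_eq_product _ hne]
  rfl
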